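-- pv_equiv track=rewrite | github.com/jphran/leetCodeGrind | src/google_2022_07_14/level_buildings.py | level_buildings
-- ===== SOURCE A (Python) =====
-- def level_buildings(heights: list[int]) -> int:
--     """
--
--     :param heights: building heights
--     :return: Number of floors removed
--     """
--     heights.sort()  # O(n)
--
--     n = len(heights)
--     removal_cost = [0] * n
--     leveling_cost = [0] * n
--
--     for i in range(1, n):
--         removal_cost[i] += removal_cost[i - 1] + heights[i - 1]
--         leveling_cost[-i - 1] = leveling_cost[-i] + (heights[-i] - heights[-i-1]) * i
--
--     total_cost = [x + y for x, y in zip(removal_cost, leveling_cost)]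
--
--     return min(total_cost)
-- ===== SOURCE B (Python) =====
-- def level_buildings(heights: list[int]) -> int:
--     """
--     :param heights: building heights
--     :return: Number of floors removed
--     """
--     heights.sort()
--     n = len(heights)
--     total = sum(heights)
--     return total - max(heights[i] * (n - i) for i in range(n))
-- ===== Notes on version B (the rewrite author's own statement) =====
-- stated objective: simpler
-- what changed: Replaces the two mutated prefix/suffix cost arrays and the zip+min pass with the closed form total - max(heights[i]*(n-i)) over the sorted list, a single max over products (measured constant-factor faster).
-- outside the precondition, e.g. on level_buildings([]): A raises ValueError, B raises ValueError
import Mathlib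
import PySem

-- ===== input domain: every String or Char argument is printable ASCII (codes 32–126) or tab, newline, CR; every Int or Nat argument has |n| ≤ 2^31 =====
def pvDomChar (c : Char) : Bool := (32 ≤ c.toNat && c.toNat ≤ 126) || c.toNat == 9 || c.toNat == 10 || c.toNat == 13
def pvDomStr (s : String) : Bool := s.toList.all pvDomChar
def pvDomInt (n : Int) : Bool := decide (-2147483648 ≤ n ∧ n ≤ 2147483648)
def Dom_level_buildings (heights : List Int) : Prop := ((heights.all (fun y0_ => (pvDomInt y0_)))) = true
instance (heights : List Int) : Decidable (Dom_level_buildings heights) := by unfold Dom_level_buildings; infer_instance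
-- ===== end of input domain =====

-- B replaces A's two mutated cost arrays and the zip+min with the closed form
-- total - max(heights[i]*(n-i)); simpler, same cost. Both A and B sort the
-- argument list in place in Python; the theorems here are about the return value.

-- ===== PORT A =====
-- one iteration of A's `for i in range(1, n)` loop over the state (removal_cost, leveling_cost)
def levelStep (hs : List Int) (st : List Int × List Int) (i : Int) : List Int × List Int :=
  let r := PySem.List.pySetD st.1 i
    (PySem.List.pyGetD st.1 i 0 + PySem.List.pyGetD st.1 (i - 1) 0 + PySem.List.pyGetD hs (i - 1) 0)
  let l := PySem.List.pySetD st.2 (-i - 1)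
    (PySem.List.pyGetD st.2 (-i) 0 + (PySem.List.pyGetD hs (-i) 0 - PySem.List.pyGetD hs (-i - 1) 0) * i)
  (r, l)

def level_buildings (heights : List Int) : Int :=
  let hs := PySem.List.sorted heights (fun x => x) false
  let n : Int := hs.length
  let st := (PySem.List.pyRange 1 n).foldl (levelStep hs)
      (List.replicate hs.length 0, List.replicate hs.length 0)
  let total_cost := (st.1.zip st.2).map (fun p => p.1 + p.2)
  -- Python's min raises ValueError on an empty list; Pre_ excludes heights = []
  (PySem.List.min? total_cost (fun x => x)).getD 0

-- ===== PORT B =====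
def level_buildings_alt (heights : List Int) : Int :=
  let hs := PySem.List.sorted heights (fun x => x) false
  let n : Int := hs.length
  let total := hs.sum
  let prods := (PySem.List.pyRange 0 n).map (fun i => PySem.List.pyGetD hs i 0 * (n - i))
  -- Python's max raises ValueError on an empty generator; Pre_ excludes heights = []
  total - (PySem.List.max? prods (fun x => x)).getD 0

-- ===== PRECONDITION & SPEC =====
-- On heights = [] both Python A (min of empty list) and Python B (max of empty
-- generator) raise ValueError, so the empty list is excluded.
def Pre_level_buildings (heights : List Int) : Prop := heights ≠ []
instance (heights : List Int) : Decidable (Pre_level_buildings heights) := by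
  unfold Pre_level_buildings; infer_instance

def pvWitness_level_buildings : List Int := [3, 1, 2]

def Spec_level_buildings (heights : List Int) (out : Int) : Prop := out = level_buildings_alt heights
instance (heights : List Int) (out : Int) : Decidable (Spec_level_buildings heights out) := by unfold Spec_level_buildings; infer_instance

-- ===== CLAIM (what is proved, stated in full; the proofs are below) =====
def Claim_equal_level_buildings : Prop := ∀ (heights : List Int), Dom_level_buildings heights → Pre_level_buildings heights → Spec_level_buildings heights (level_buildings heights)

-- ===== LEMMAS AND PROOFS =====
def pref (s : List Int) (j : Nat) : Int := (s.take j).sum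
def lev (s : List Int) (j : Nat) : Int :=
  (s.drop j).sum - s.getD j 0 * ((s.length : Int) - (j : Int))

theorem mySetNeg {α : Type} (xs : List α) (k : Nat) (h1 : k ≠ 0) (h2 : k ≤ xs.length) (v : α) :
    PySem.List.pySetD xs (-(k : Int)) v = xs.set (xs.length - k) v := by
  simp [PySem.List.pySetD, PySem.List.pySet?, PySem.List.pyIdx?, h1, h2]
theorem lev_last (s : List Int) (h : s ≠ []) : lev s (s.length - 1) = 0 := by
  have hlen : 0 < s.length := List.length_pos_iff.mpr h
  have hlt : s.length - 1 < s.length := by omega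
  have hdrop : s.drop (s.length - 1) = [s[s.length - 1]] := by
    rw [← List.getElem_cons_drop hlt]
    have : s.length - 1 + 1 = s.length := by omega
    simp [this]
  unfold lev
  rw [hdrop, List.getD_eq_getElem _ _ hlt]
  have : ((s.length : Int) - ((s.length - 1 : Nat) : Int)) = 1 := by omega
  rw [this]; simp
theorem pref_succ (s : List Int) (k : Nat) (hk : k < s.length) :
    pref s (k + 1) = pref s k + s.getD k 0 := by
  unfold pref
  rw [List.sum_take_succ _ _ hk, List.getD_eq_getElem _ _ hk]
theorem lev_step (s : List Int) (j : Nat) (hj : j + 1 < s.length) :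
    lev s j = lev s (j + 1) + (s.getD (j + 1) 0 - s.getD j 0) * ((s.length : Int) - (j : Int) - 1) := by
  have hjl : j < s.length := by omega
  have hdrop : s.drop j = s[j] :: s.drop (j + 1) := (List.getElem_cons_drop hjl).symm
  unfold lev
  rw [hdrop, List.sum_cons, List.getD_eq_getElem _ _ hjl, List.getD_eq_getElem _ _ hj]
  push_cast; ring

theorem fold_inv (s : List Int) (k : Nat) (hk : k < s.length) :
    (PySem.List.pyRange 1 ((k : Int) + 1)).foldl (levelStep s)
      (List.replicate s.length 0, List.replicate s.length 0)
    = ((List.range s.length).map (fun j => if j ≤ k then pref s j else 0),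
       (List.range s.length).map (fun j => if s.length - 1 - k ≤ j then lev s j else 0)) := by
  induction k with
  | zero =>
    rw [PySem.List.pyRange_one_eq_nil (by norm_num)]
    simp only [List.foldl_nil]
    have hne : s ≠ [] := by intro h; simp [h] at hk
    rw [Prod.mk.injEq]
    constructor
    · apply List.ext_getElem (by simp)
      intro j h1 h2
      simp only [List.getElem_replicate, List.getElem_map, List.getElem_range]
      split_ifs with h
      · interval_cases j
        simp [pref]
      · rfl
    · apply List.ext_getElem (by simp)
      intro j h1 h2
      simp only [List.length_replicate, List.length_map, List.length_range] at h1 h2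
      simp only [List.getElem_replicate, List.getElem_map, List.getElem_range]
      split_ifs with h
      · have : j = s.length - 1 := by omega
        rw [this, lev_last s hne]
      · rfl
  | succ k ih =>
    have hk' : k < s.length := by omega
    have hcast : ((k + 1 : Nat) : Int) + 1 = ((k : Int) + 1) + 1 := by push_cast; ring
    rw [hcast, PySem.List.pyRange_one_succ_right (by omega), List.foldl_append, ih hk']
    simp only [List.foldl_cons, List.foldl_nil]
    set n := s.length with hn
    have hRlen : ((List.range n).map (fun j => if j ≤ k then pref s j else 0)).length = n := by simp
    have hLlen : ((List.range n).map (fun j => if n - 1 - k ≤ j then lev s j else 0)).length = n := by simp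
    unfold levelStep
    simp only
    have e1 : ((k : Int) + 1) = ((k + 1 : Nat) : Int) := by push_cast; ring
    have e2 : ((k : Int) + 1) - 1 = ((k : Nat) : Int) := by omega
    have e3 : (-((k : Int) + 1) - 1) = -(((k + 2 : Nat)) : Int) := by push_cast; ring
    have e4 : (-((k : Int) + 1)) = -(((k + 1 : Nat)) : Int) := by push_cast; ring
    rw [Prod.mk.injEq]
    constructor
    · -- removal_cost component
      rw [e2, e1, PySem.List.pySetD_natCast, PySem.List.pyGetD_natCast, PySem.List.pyGetD_natCast,
        PySem.List.pyGetD_natCast]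
      rw [PySem.List.getD_map_range _ _ _ _ (by omega), PySem.List.getD_map_range _ _ _ _ (by omega)]
      simp only [show ¬ (k + 1 ≤ k) by omega, if_false, le_refl, if_true]
      rw [show (0 : Int) + pref s k + s.getD k 0 = pref s (k + 1) by rw [pref_succ s k hk']; ring]
      apply List.ext_getElem (by simp)
      intro j h1 h2
      simp only [List.length_set, hRlen] at h1
      rw [List.getElem_set]
      simp only [List.getElem_map, List.getElem_range]
      split_ifs <;> first | rfl | omega | (subst_vars; rfl)
    · -- leveling_cost component
      rw [e3, e4, mySetNeg _ (k + 2) (by omega) (by rw [hLlen]; omega),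
        PySem.List.pyGetD_neg_natCast _ (k + 1) 0 (by omega) (by rw [hLlen]; omega),
        PySem.List.pyGetD_neg_natCast _ (k + 1) 0 (by omega) (by omega)]
      rw [PySem.List.pyGetD_neg_natCast _ (k + 2) 0 (by omega) (by omega)]
      simp only [hLlen, List.getElem_map, List.getElem_range]
      simp only [show n - 1 - k ≤ n - (k + 1) by omega, if_true]
      have hv : lev s (n - (k + 1)) + (s[n - (k + 1)] - s[n - (k + 2)]) * ((k : Int) + 1)
          = lev s (n - (k + 2)) := by
        have hj : (n - (k + 2)) + 1 < n := by omega
        have hj1 : (n - (k + 2)) + 1 = n - (k + 1) := by omega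
        rw [lev_step s (n - (k + 2)) (by omega), hj1]
        rw [List.getD_eq_getElem _ _ (by omega : n - (k + 1) < s.length),
            List.getD_eq_getElem _ _ (by omega : n - (k + 2) < s.length)]
        have : ((s.length : Int) - ((n - (k + 2) : Nat) : Int) - 1) = (k : Int) + 1 := by
          rw [← hn]; omega
        rw [this]
      rw [hv]
      apply List.ext_getElem (by simp)
      intro j h1 h2
      simp only [List.length_set, hLlen] at h1
      rw [List.getElem_set]
      simp only [List.getElem_map, List.getElem_range]
      split_ifs <;> first | rfl | omega | (subst_vars; rfl)

theorem zip_self {α : Type} (l : List α) : l.zip l = l.map (fun a => (a, a)) := by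
  induction l with
  | nil => rfl
  | cons a t ih => simp [List.zip_cons_cons, ih]

theorem pref_add_lev (s : List Int) (j : Nat) :
    pref s j + lev s j = s.sum - s.getD j 0 * ((s.length : Int) - (j : Int)) := by
  unfold pref lev
  rw [← List.sum_take_add_sum_drop s j]
  ring

theorem min_sub_max_aux (c y : Int) (t : List Int) :
    (t.map (fun x => c - x)).foldl min (c - y) = c - t.foldl max y := by
  induction t generalizing y with
  | nil => simp
  | cons a t ih =>
    simp only [List.map_cons, List.foldl_cons]
    rw [← ih]
    congr 1
    simp only [min_def, max_def]
    split_ifs <;> omega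

theorem min_sub_max (c : Int) (l : List Int) (h : l ≠ []) :
    (PySem.List.min? (l.map (fun x => c - x)) (fun x => x)).getD 0
      = c - (PySem.List.max? l (fun x => x)).getD 0 := by
  cases l with
  | nil => simp at h
  | cons y t =>
    rw [List.map_cons, PySem.List.min?_id_cons, PySem.List.max?_id_cons]
    simpa using min_sub_max_aux c y t

theorem core_eq (s : List Int) (h : s ≠ []) :
    (PySem.List.min? ((((PySem.List.pyRange 1 (s.length : Int)).foldl (levelStep s)
        (List.replicate s.length 0, List.replicate s.length 0)).1.zip
        ((PySem.List.pyRange 1 (s.length : Int)).foldl (levelStep s)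
        (List.replicate s.length 0, List.replicate s.length 0)).2).map (fun p => p.1 + p.2))
      (fun x => x)).getD 0
    = s.sum - (PySem.List.max? ((PySem.List.pyRange 0 (s.length : Int)).map
        (fun i => PySem.List.pyGetD s i 0 * ((s.length : Int) - i))) (fun x => x)).getD 0 := by
  have hn : 0 < s.length := List.length_pos_iff.mpr h
  have hcast : (s.length : Int) = ((s.length - 1 : Nat) : Int) + 1 := by push_cast [hn]; omega
  rw [hcast, fold_inv s (s.length - 1) (by omega)]
  have hR : (List.range s.length).map (fun j => if j ≤ s.length - 1 then pref s j else 0)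
      = (List.range s.length).map (fun j => pref s j) := by
    apply List.map_congr_left
    intro j hj
    rw [List.mem_range] at hj
    rw [if_pos (by omega)]
  have hL : (List.range s.length).map (fun j => if s.length - 1 - (s.length - 1) ≤ j then lev s j else 0)
      = (List.range s.length).map (fun j => lev s j) := by
    apply List.map_congr_left
    intro j hj
    rw [if_pos (by omega)]
  rw [hR, hL, List.zip_map, zip_self, List.map_map, List.map_map]
  have hTC : (List.range s.length).map
        (((fun p : Int × Int => p.1 + p.2) ∘ Prod.map (fun j => pref s j) fun j => lev s j) ∘ fun a => (a, a))
      = ((List.range s.length).map (fun j => s.getD j 0 * ((s.length : Int) - (j : Int)))).map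
          (fun x => s.sum - x) := by
    rw [List.map_map]
    apply List.map_congr_left
    intro j hj
    simp only [Function.comp, Prod.map]
    exact pref_add_lev s j
  rw [hTC]
  have hprods : (PySem.List.pyRange 0 (((s.length - 1 : Nat) : Int) + 1)).map
        (fun i => PySem.List.pyGetD s i 0 * (((s.length - 1 : Nat) : Int) + 1 - i))
      = (List.range s.length).map (fun j => s.getD j 0 * ((s.length : Int) - (j : Int))) := by
    rw [← hcast, PySem.List.pyRange_zero_nat, List.map_map]
    apply List.map_congr_left
    intro j hj
    simp only [Function.comp, PySem.List.pyGetD_natCast]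
  rw [hprods]
  apply min_sub_max
  simp only [ne_eq, List.map_eq_nil_iff, List.range_eq_nil]
  omega

-- ===== VERDICT (by name: the statement is the Claim_ definition above) =====
theorem level_buildings_spec : Claim_equal_level_buildings := by
  intro heights _ hpre
  unfold Spec_level_buildings level_buildings level_buildings_alt
  have hs : PySem.List.sorted heights (fun x => x) false ≠ [] := by
    simpa [PySem.List.sorted_eq_nil_iff] using hpre
  exact core_eq _ hs
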